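-- pv_equiv track=rewrite | github.com/Yuanhy1997/CHIP_ConceptRetrival_2020 | CHIP2020/match.py | set_find
-- ===== SOURCE A (Python) =====
-- punc_set = set("、，。,.；;()（）[]【】\"\'")
--
-- def split(x, punc_set):
--     opt = []
--     now = ""
--     for ch in x:
--         if ch in punc_set:
--             if now:
--                 opt.append(now)
--                 now = ""
--         else:
--             now = now + ch
--     if now:
--         opt.append(now)
--     return opt
--
-- def set_find(x, y):
--     use_punc_set = set([punc for punc in punc_set if not punc in y])
--     split_x = split(x, use_punc_set)
--     for xx in split_x:
--         if set(y) <= set(xx):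
--             return True
--         if len(set(y) & set(x)) > 3:
--             return True
--     return False
-- ===== SOURCE B (Python) =====
-- punc_set = set("、，。,.；;()（）[]【】\"\'")
--
-- def set_find(x, y):
--     yset = set(y)
--     inter_big = len(set(x) & yset) > 3
--     covered = set()
--     saw_run = False
--     for ch in x:
--         if ch in punc_set and ch not in yset:
--             covered = set()
--         else:
--             saw_run = True
--             if ch in yset:
--                 covered.add(ch)
--             if yset <= covered:
--                 return True
--     return saw_run and inter_big
-- ===== Notes on version B (the rewrite author's own statement) =====
-- stated objective: faster
-- what changed: B replaces A's two-phase approach (materialise the full list of punctuation-split substrings, then scan it rebuilding set(y) and the x-y intersection on every part) by a single streaming pass over x that maintains a per-run covered set of y-characters (reset at separators) with an early return, plus a once-computed intersection flag and a saw-a-run flag.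
import Mathlib
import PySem

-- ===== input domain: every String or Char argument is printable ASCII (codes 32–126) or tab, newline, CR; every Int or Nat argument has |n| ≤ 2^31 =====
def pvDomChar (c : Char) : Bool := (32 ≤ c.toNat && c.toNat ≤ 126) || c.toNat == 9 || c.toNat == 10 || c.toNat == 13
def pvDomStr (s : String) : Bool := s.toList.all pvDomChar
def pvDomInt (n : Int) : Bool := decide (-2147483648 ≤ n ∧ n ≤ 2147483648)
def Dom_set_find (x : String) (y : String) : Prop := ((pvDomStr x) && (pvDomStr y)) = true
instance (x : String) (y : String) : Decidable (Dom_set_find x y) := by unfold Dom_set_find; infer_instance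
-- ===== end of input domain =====

-- B replaces A's build-the-list-of-split-parts-then-scan approach by a single streaming pass
-- over x with a per-run covered set and once-computed flags (objective: faster, measured).

-- ===== PORT A =====
def pvPuncChars : List Char := "、，。,.；;()（）[]【】\"'".toList

def pvSplit (xs : List Char) (use : PySem.Set Char) : List (List Char) :=
  let st := xs.foldl
    (fun (s : List (List Char) × List Char) ch =>
      if PySem.Set.contains use ch then
        (if s.2 = [] then s else (s.1 ++ [s.2], ([] : List Char)))
      else (s.1, s.2 ++ [ch])) ([], [])
  if st.2 = [] then st.1 else st.1 ++ [st.2]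

def pvALoop (yl xl : List Char) : List (List Char) → Bool
  | [] => false
  | xx :: rest =>
    if PySem.Set.issubset (PySem.Set.ofList yl) (PySem.Set.ofList xx) then true
    else if 3 < PySem.Set.len (PySem.Set.inter (PySem.Set.ofList yl) (PySem.Set.ofList xl)) then true
    else pvALoop yl xl rest

def set_find (x : String) (y : String) : Bool :=
  let usePunc : PySem.Set Char :=
    (PySem.Set.ofList pvPuncChars).filter (fun p => !(y.toList.contains p))
  let splitX := pvSplit x.toList usePunc
  pvALoop y.toList x.toList splitX

-- ===== PORT B =====
def pvIsSep (yset : PySem.Set Char) (ch : Char) : Bool :=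
  PySem.Set.contains (PySem.Set.ofList pvPuncChars) ch && !(PySem.Set.contains yset ch)

def pvBLoop (yset : PySem.Set Char) (interBig : Bool) :
    List Char → PySem.Set Char → Bool → Bool
  | [], _, sawRun => sawRun && interBig
  | ch :: rest, covered, sawRun =>
    if pvIsSep yset ch then pvBLoop yset interBig rest PySem.Set.empty sawRun
    else
      let covered' := if PySem.Set.contains yset ch then PySem.Set.add covered ch else covered
      if PySem.Set.issubset yset covered' then true
      else pvBLoop yset interBig rest covered' true

def set_find_alt (x : String) (y : String) : Bool :=
  let yset := PySem.Set.ofList y.toList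
  let interBig := decide (3 < PySem.Set.len (PySem.Set.inter (PySem.Set.ofList x.toList) yset))
  pvBLoop yset interBig x.toList PySem.Set.empty false

-- ===== PRECONDITION & SPEC =====
def Spec_set_find (x : String) (y : String) (out : Bool) : Prop := out = set_find_alt x y
instance (x : String) (y : String) (out : Bool) : Decidable (Spec_set_find x y out) := by unfold Spec_set_find; infer_instance

-- ===== CLAIM (what is proved, stated in full; the proofs are below) =====
def Claim_equal_set_find : Prop := ∀ (x : String) (y : String), Dom_set_find x y → Spec_set_find x y (set_find x y)

-- ===== LEMMAS AND PROOFS =====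

-- the split of the remaining characters, given the run accumulated so far
def pvRem (sep : Char → Bool) : List Char → List Char → List (List Char)
  | [], now => if now = [] then [] else [now]
  | c :: cs, now =>
    if sep c then (if now = [] then pvRem sep cs [] else now :: pvRem sep cs [])
    else pvRem sep cs (now ++ [c])

lemma pvFold_eq (use : PySem.Set Char) :
    ∀ (cs : List Char) (opt : List (List Char)) (now : List Char),
    (if (cs.foldl (fun (s : List (List Char) × List Char) ch =>
          if PySem.Set.contains use ch then
            (if s.2 = [] then s else (s.1 ++ [s.2], ([] : List Char)))
          else (s.1, s.2 ++ [ch])) (opt, now)).2 = []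
     then (cs.foldl (fun (s : List (List Char) × List Char) ch =>
          if PySem.Set.contains use ch then
            (if s.2 = [] then s else (s.1 ++ [s.2], ([] : List Char)))
          else (s.1, s.2 ++ [ch])) (opt, now)).1
     else (cs.foldl (fun (s : List (List Char) × List Char) ch =>
          if PySem.Set.contains use ch then
            (if s.2 = [] then s else (s.1 ++ [s.2], ([] : List Char)))
          else (s.1, s.2 ++ [ch])) (opt, now)).1
          ++ [(cs.foldl (fun (s : List (List Char) × List Char) ch =>
          if PySem.Set.contains use ch then
            (if s.2 = [] then s else (s.1 ++ [s.2], ([] : List Char)))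
          else (s.1, s.2 ++ [ch])) (opt, now)).2])
    = opt ++ pvRem (fun c => PySem.Set.contains use c) cs now := by
  intro cs
  induction cs with
  | nil =>
    intro opt now
    simp only [List.foldl_nil, pvRem]
    by_cases h : now = [] <;> simp [h]
  | cons c cs ih =>
    intro opt now
    simp only [List.foldl_cons]
    cases hc : PySem.Set.contains use c with
    | true =>
      simp only [pvRem, hc, if_true]
      by_cases hn : now = []
      · rw [if_pos hn, if_pos hn]
        subst hn; exact ih opt []
      · rw [if_neg hn, if_neg hn, ih (opt ++ [now]) []]
        simp only [List.append_assoc, List.singleton_append]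
    | false =>
      simp only [pvRem, hc, Bool.false_eq_true, if_false]
      exact ih opt (now ++ [c])


lemma pvSplit_eq (use : PySem.Set Char) (xs : List Char) :
    pvSplit xs use = pvRem (fun c => PySem.Set.contains use c) xs [] := by
  have h := pvFold_eq use xs [] []
  simpa [pvSplit] using h

lemma issubset_empty_false (yset : PySem.Set Char) (hy : yset ≠ []) :
    PySem.Set.issubset yset (PySem.Set.empty : PySem.Set Char) = false := by
  apply Bool.eq_false_iff.mpr
  intro h
  rw [PySem.Set.issubset_iff] at h
  obtain ⟨a, ha⟩ := List.exists_mem_of_ne_nil yset hy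
  exact absurd (h a ha) (by simp [PySem.Set.empty])

lemma sep_eq (y : String) (c : Char) :
    PySem.Set.contains ((PySem.Set.ofList pvPuncChars).filter (fun p => !(y.toList.contains p))) c
      = pvIsSep (PySem.Set.ofList y.toList) c := by
  rw [Bool.eq_iff_iff]
  simp [pvIsSep, List.mem_filter, PySem.Set.mem_ofList]

lemma aLoop_eq (yl xl : List Char) (parts : List (List Char)) :
    pvALoop yl xl parts =
      (parts.any (fun p => PySem.Set.issubset (PySem.Set.ofList yl) (PySem.Set.ofList p))
        || (!parts.isEmpty
             && decide (3 < PySem.Set.len (PySem.Set.inter (PySem.Set.ofList yl) (PySem.Set.ofList xl))))) := by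
  induction parts with
  | nil => rfl
  | cons xx rest ih =>
    rw [pvALoop]
    by_cases h1 : PySem.Set.issubset (PySem.Set.ofList yl) (PySem.Set.ofList xx) = true
    · simp [h1]
    · rw [if_neg h1]
      by_cases h2 : 3 < PySem.Set.len (PySem.Set.inter (PySem.Set.ofList yl) (PySem.Set.ofList xl))
      · rw [if_pos h2, decide_eq_true h2]
        simp [h1]
      · rw [if_neg h2, ih, decide_eq_false h2]
        simp [h1]

lemma inter_len_comm (a b : List Char) :
    PySem.Set.len (PySem.Set.inter (PySem.Set.ofList a) (PySem.Set.ofList b))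
      = PySem.Set.len (PySem.Set.inter (PySem.Set.ofList b) (PySem.Set.ofList a)) := by
  unfold PySem.Set.len
  congr 1
  refine List.Perm.length_eq ?_
  refine (List.perm_ext_iff_of_nodup ?_ ?_).mpr ?_
  · exact PySem.Set.nodup_inter _ _ (PySem.Set.nodup_ofList a)
  · exact PySem.Set.nodup_inter _ _ (PySem.Set.nodup_ofList b)
  · intro c
    simp [PySem.Set.mem_inter, PySem.Set.mem_ofList, and_comm]


lemma pvRem_head (sep : Char → Bool) :
    ∀ (cs now : List Char), now ≠ [] →
      ∃ ext rest, pvRem sep cs now = (now ++ ext) :: rest := by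
  intro cs
  induction cs with
  | nil =>
    intro now hn
    exact ⟨[], [], by simp [pvRem, hn]⟩
  | cons c cs ih =>
    intro now hn
    by_cases hc : sep c = true
    · exact ⟨[], pvRem sep cs [], by simp [pvRem, hc, hn]⟩
    · obtain ⟨ext, rest, h⟩ := ih (now ++ [c]) (by simp)
      exact ⟨[c] ++ ext, rest, by simp [pvRem, hc, h]⟩

lemma pvRem_nil_isEmpty (sep : Char → Bool) :
    ∀ cs : List Char, (pvRem sep cs []).isEmpty = !cs.any (fun c => !sep c) := by
  intro cs
  induction cs with
  | nil => rfl
  | cons c cs ih =>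
    by_cases hc : sep c = true
    · simp [pvRem, hc, ih]
    · obtain ⟨ext, rest, h⟩ := pvRem_head sep cs [c] (by simp)
      simp [pvRem, hc, h]

lemma bLoop_empty (interBig : Bool) :
    ∀ (cs : List Char) (covered : PySem.Set Char) (sawRun : Bool),
      pvBLoop [] interBig cs covered sawRun
        = (cs.any (fun c => !pvIsSep [] c) || (sawRun && interBig)) := by
  intro cs
  induction cs with
  | nil => intro covered sawRun; simp [pvBLoop]
  | cons c cs ih =>
    intro covered sawRun
    by_cases hc : pvIsSep [] c = true
    · simp [pvBLoop, hc, ih]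
    · have hsub : PySem.Set.issubset ([] : PySem.Set Char)
        (if PySem.Set.contains ([] : PySem.Set Char) c then PySem.Set.add covered c else covered) = true := by
        simp [PySem.Set.issubset]
      simp [pvBLoop, hc]

lemma sub_now_false (yset : PySem.Set Char) (now covered : List Char)
    (H1 : ∀ c, c ∈ covered ↔ (c ∈ yset ∧ c ∈ now))
    (H2 : PySem.Set.issubset yset covered = false) :
    PySem.Set.issubset yset (PySem.Set.ofList now) = false := by
  apply Bool.eq_false_iff.mpr
  intro h
  apply Bool.eq_false_iff.mp H2
  rw [PySem.Set.issubset_iff] at h ⊢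
  intro c hcY
  exact (H1 c).mpr ⟨hcY, (PySem.Set.mem_ofList now c).mp (h c hcY)⟩

lemma bLoop_eq (yset : PySem.Set Char) (hy : yset ≠ []) (interBig : Bool) :
    ∀ (cs now : List Char) (covered : PySem.Set Char) (sawRun : Bool),
    (∀ c, c ∈ covered ↔ (c ∈ yset ∧ c ∈ now)) →
    PySem.Set.issubset yset covered = false →
    (now ≠ [] → sawRun = true) →
    pvBLoop yset interBig cs covered sawRun =
      ((pvRem (pvIsSep yset) cs now).any (fun p => PySem.Set.issubset yset (PySem.Set.ofList p))
        || ((sawRun || !(pvRem (pvIsSep yset) cs now).isEmpty) && interBig)) := by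
  intro cs
  induction cs with
  | nil =>
    intro now covered sawRun H1 H2 H3
    by_cases hn : now = []
    · subst hn; simp [pvBLoop, pvRem]
    · have hsub := sub_now_false yset now covered H1 H2
      rw [H3 hn]
      simp [pvBLoop, pvRem, hn, hsub]
  | cons c cs ih =>
    intro now covered sawRun H1 H2 H3
    by_cases hc : pvIsSep yset c = true
    · have hemp := issubset_empty_false yset hy
      have hrec := ih [] PySem.Set.empty sawRun (by simp [PySem.Set.empty]) hemp (by simp)
      by_cases hn : now = []
      · subst hn
        simp only [pvBLoop, hc, if_true, pvRem]
        exact hrec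
      · have hsub := sub_now_false yset now covered H1 H2
        rw [H3 hn] at hrec ⊢
        simp only [pvBLoop, hc, if_true, pvRem, if_neg hn]
        rw [hrec]
        simp [hsub]
    · have H1' : ∀ a, a ∈ (if PySem.Set.contains yset c then PySem.Set.add covered c else covered) ↔
          (a ∈ yset ∧ a ∈ now ++ [c]) := by
        intro a
        by_cases hcy : PySem.Set.contains yset c = true
        · rw [if_pos hcy, PySem.Set.mem_add]
          have hcY : c ∈ yset := (PySem.Set.contains_iff yset c).mp hcy
          constructor
          · rintro (h | rfl)
            · exact ⟨((H1 a).mp h).1, by simp [((H1 a).mp h).2]⟩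
            · exact ⟨hcY, by simp⟩
          · rintro ⟨ha, hm⟩
            rcases List.mem_append.mp hm with h | h
            · exact Or.inl ((H1 a).mpr ⟨ha, h⟩)
            · exact Or.inr (List.mem_singleton.mp h)
        · rw [if_neg hcy]
          constructor
          · intro h
            exact ⟨((H1 a).mp h).1, by simp [((H1 a).mp h).2]⟩
          · rintro ⟨ha, hm⟩
            rcases List.mem_append.mp hm with h | h
            · exact (H1 a).mpr ⟨ha, h⟩
            · rw [List.mem_singleton.mp h] at ha
              exact absurd ((PySem.Set.contains_iff yset c).mpr ha) hcy
      by_cases hs : PySem.Set.issubset yset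
          (if PySem.Set.contains yset c then PySem.Set.add covered c else covered) = true
      · obtain ⟨ext, rest, hrem⟩ := pvRem_head (pvIsSep yset) cs (now ++ [c]) (by simp)
        have hcov : PySem.Set.issubset yset (PySem.Set.ofList ((now ++ [c]) ++ ext)) = true := by
          rw [PySem.Set.issubset_iff]
          intro a haY
          have hmem := ((H1' a).mp ((PySem.Set.issubset_iff _ _).mp hs a haY)).2
          rw [PySem.Set.mem_ofList]
          exact List.mem_append.mpr (Or.inl hmem)
        simp only [pvBLoop, hc, Bool.false_eq_true, if_false, hs, if_true, pvRem, hrem]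
        simp only [List.any_cons, hcov, Bool.true_or]
      · have hrec := ih (now ++ [c])
          (if PySem.Set.contains yset c then PySem.Set.add covered c else covered) true H1'
          (Bool.eq_false_iff.mpr hs) (fun _ => rfl)
        obtain ⟨ext, rest, hrem⟩ := pvRem_head (pvIsSep yset) cs (now ++ [c]) (by simp)
        simp only [pvBLoop, hc, Bool.false_eq_true, if_false, hs, pvRem]
        rw [hrec, hrem]
        simp

-- ===== VERDICT (by name: the statement is the Claim_ definition above) =====
theorem set_find_spec : Claim_equal_set_find := by
  intro x y _
  unfold Spec_set_find set_find set_find_alt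
  show pvALoop y.toList x.toList
      (pvSplit x.toList ((PySem.Set.ofList pvPuncChars).filter (fun p => !(y.toList.contains p))))
    = pvBLoop (PySem.Set.ofList y.toList)
        (decide (3 < PySem.Set.len (PySem.Set.inter (PySem.Set.ofList x.toList)
          (PySem.Set.ofList y.toList)))) x.toList PySem.Set.empty false
  rw [pvSplit_eq, aLoop_eq, funext (sep_eq y), inter_len_comm y.toList x.toList]
  by_cases hy : PySem.Set.ofList y.toList = ([] : List Char)
  · rw [hy, bLoop_empty]
    simp only [PySem.Set.issubset, PySem.Set.inter, PySem.Set.len, PySem.Set.contains,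
      List.all_nil]
    have hany : ((pvRem (fun c => pvIsSep [] c) x.toList []).any fun p => true)
        = !(pvRem (fun c => pvIsSep [] c) x.toList []).isEmpty := by
      cases (pvRem (fun c => pvIsSep [] c) x.toList []) <;> rfl
    rw [hany, pvRem_nil_isEmpty (fun c => pvIsSep [] c)]
    simp
  · rw [bLoop_eq (PySem.Set.ofList y.toList) hy _ x.toList [] PySem.Set.empty false
      (by simp [PySem.Set.empty]) (issubset_empty_false _ hy) (by simp)]
    simp
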